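-- pv_equiv track=rewrite | github.com/Maximo-Vazquez/chatbotOperativa | prueba/prueba.py | secuencia_dos_unos
-- ===== SOURCE A (Python) =====
-- def secuencia_dos_unos(binario: int, contador: int) -> int:
--     if binario  == 0:
--
--         if contador == 2:
--             return 1
--         else:
--             return 0
--     else:
--         digito = binario % 10
--
--         if contador == 1:
--             if digito == 1:
--                 return secuencia_dos_unos(binario // 10, 0) + 1
--
--
--         else:
--             if digito == 1:
--                 return secuencia_dos_unos(binario // 10, 1)
--         return secuencia_dos_unos(binario // 10, 0)
-- ===== SOURCE B (Python) =====
-- def secuencia_dos_unos(binario: int, contador: int) -> int: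
--     # A counts, scanning digits least-significant first, non-overlapping pairs of
--     # adjacent '1' digits (a pending '1' encoded as contador == 1); equivalently,
--     # each maximal run of k consecutive '1' digits contributes k // 2, with the
--     # least-significant run extended by one if contador == 1.
--     if binario == 0:
--         return 1 if contador == 2 else 0
--     digits = []
--     while binario != 0:
--         digits.append(binario % 10)
--         binario //= 10
--     total = 0
--     run = 1 if contador == 1 else 0
--     for d in digits:
--         if d == 1:
--             run += 1
--         else:
--             total += run // 2
--             run = 0
--     return total + run // 2
-- ===== Notes on version B (the rewrite author's own statement) =====
-- stated objective: alternative
-- what changed: Replaces A's recursive pairing state machine by two staged passes: extract the digit list, then fold over it counting maximal runs of 1-digits and summing run//2 per run (seeding the first run from contador).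
import Mathlib
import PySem

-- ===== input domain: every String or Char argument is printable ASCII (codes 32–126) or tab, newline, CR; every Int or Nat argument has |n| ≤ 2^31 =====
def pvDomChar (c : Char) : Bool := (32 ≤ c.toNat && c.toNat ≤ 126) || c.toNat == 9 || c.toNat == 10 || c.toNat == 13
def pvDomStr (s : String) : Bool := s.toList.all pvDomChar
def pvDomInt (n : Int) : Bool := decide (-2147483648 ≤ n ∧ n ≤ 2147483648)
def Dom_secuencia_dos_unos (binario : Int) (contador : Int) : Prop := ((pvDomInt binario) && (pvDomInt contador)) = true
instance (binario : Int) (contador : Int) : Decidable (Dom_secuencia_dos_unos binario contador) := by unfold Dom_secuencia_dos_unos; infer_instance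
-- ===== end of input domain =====

-- B replaces A's recursive pairing state machine by two staged passes: digit extraction, then a run-counting fold (run//2 per maximal run of 1s).


-- ===== PORT A =====
-- fuel makes A's recursion total in Lean; fuel = binario.toNat + 1 suffices for every binario ≥ 0 (Pre_)
def secuenciaGoA (fuel : Nat) (binario : Int) (contador : Int) : Int :=
  match fuel with
  | 0 => 0
  | f + 1 =>
    if binario = 0 then
      if contador = 2 then 1 else 0
    else
      let digito := PySem.Int.mod binario 10
      if contador = 1 then
        if digito = 1 then secuenciaGoA f (PySem.Int.floordiv binario 10) 0 + 1
        else secuenciaGoA f (PySem.Int.floordiv binario 10) 0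
      else
        if digito = 1 then secuenciaGoA f (PySem.Int.floordiv binario 10) 1
        else secuenciaGoA f (PySem.Int.floordiv binario 10) 0

def secuencia_dos_unos (binario : Int) (contador : Int) : Int :=
  secuenciaGoA (binario.toNat + 1) binario contador

-- ===== PORT B =====
-- stage 1 of Source B: the digit list (least significant first); fuel as above
def secuenciaDigitsB (fuel : Nat) (b : Int) : List Int :=
  match fuel with
  | 0 => []
  | f + 1 =>
    if b = 0 then []
    else PySem.Int.mod b 10 :: secuenciaDigitsB f (PySem.Int.floordiv b 10)

-- stage 2 of Source B: one step of the run-counting fold over (total, run)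
def secuenciaRunStep (st : Int × Int) (d : Int) : Int × Int :=
  if d = 1 then (st.1, st.2 + 1) else (st.1 + PySem.Int.floordiv st.2 2, 0)

def secuencia_dos_unos_alt (binario : Int) (contador : Int) : Int :=
  if binario = 0 then (if contador = 2 then 1 else 0)
  else
    let st := (secuenciaDigitsB (binario.toNat + 1) binario).foldl secuenciaRunStep
      (0, if contador = 1 then 1 else 0)
    st.1 + PySem.Int.floordiv st.2 2

-- ===== PRECONDITION & SPEC =====
-- Pre_ excludes negative binario: there A recurses forever (-1 // 10 = -1) and raises RecursionError.
def Pre_secuencia_dos_unos (binario : Int) (contador : Int) : Prop := 0 ≤ binario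
instance (binario : Int) (contador : Int) : Decidable (Pre_secuencia_dos_unos binario contador) := by unfold Pre_secuencia_dos_unos; infer_instance
def pvWitness_secuencia_dos_unos : Int × Int := (1101, 0)
def Spec_secuencia_dos_unos (binario : Int) (contador : Int) (out : Int) : Prop := out = secuencia_dos_unos_alt binario contador
instance (binario : Int) (contador : Int) (out : Int) : Decidable (Spec_secuencia_dos_unos binario contador out) := by unfold Spec_secuencia_dos_unos; infer_instance

-- ===== CLAIM (what is proved, stated in full; the proofs are below) =====
def Claim_equal_secuencia_dos_unos : Prop := ∀ (binario : Int) (contador : Int), Dom_secuencia_dos_unos binario contador → Pre_secuencia_dos_unos binario contador → Spec_secuencia_dos_unos binario contador (secuencia_dos_unos binario contador)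

-- ===== LEMMAS AND PROOFS =====

theorem secuencia_floordiv_lt (b : Int) (hb : 0 < b) :
    (PySem.Int.floordiv b 10).toNat < b.toNat ∧ 0 ≤ PySem.Int.floordiv b 10 := by
  rw [PySem.Int.floordiv_eq_ediv_of_pos (by omega)]
  omega

-- invariant linking B's fold state (t, r) to A's pending-1 flag: r counts the 1s of the
-- current run so far, with r odd exactly when A has contador = 1
theorem secuencia_key (fuel : Nat) :
    ∀ (b c t r : Int), 0 ≤ b → b.toNat < fuel → (b = 0 → c ≠ 2) → 0 ≤ r →
      (PySem.Int.mod r 2 = 1 ↔ c = 1) →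
      (((secuenciaDigitsB fuel b).foldl secuenciaRunStep (t, r)).1 +
        PySem.Int.floordiv (((secuenciaDigitsB fuel b).foldl secuenciaRunStep (t, r)).2) 2)
        = t + PySem.Int.floordiv r 2 + secuenciaGoA fuel b c := by
  induction fuel with
  | zero => intro b c t r _ h _ _ _; omega
  | succ f ih =>
    intro b c t r hb hf h02 hr hpar
    rw [PySem.Int.mod_eq_emod_of_pos (by omega)] at hpar
    by_cases h0 : b = 0
    · subst h0
      simp [secuenciaDigitsB, secuenciaGoA, h02 rfl]
    · have hpos : 0 < b := lt_of_le_of_ne hb (Ne.symm h0)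
      obtain ⟨hlt, hge⟩ := secuencia_floordiv_lt b hpos
      have hf' : (PySem.Int.floordiv b 10).toNat < f := by omega
      simp only [secuenciaDigitsB, secuenciaGoA, if_neg h0, List.foldl_cons, secuenciaRunStep]
      by_cases hd : PySem.Int.mod b 10 = 1
      · simp only [if_pos hd]
        by_cases hc : c = 1
        · -- r odd; pair completes: A returns +1 with contador 0
          have hrodd : r % 2 = 1 := hpar.mpr hc
          rw [ih (PySem.Int.floordiv b 10) 0 t (r + 1) hge hf'
              (fun _ => by norm_num) (by omega)
              (by rw [PySem.Int.mod_eq_emod_of_pos (by omega)]; omega)]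
          simp only [if_pos hc]
          rw [PySem.Int.floordiv_eq_ediv_of_pos (show (0:Int) < 2 by omega),
              PySem.Int.floordiv_eq_ediv_of_pos (show (0:Int) < 2 by omega)]
          omega
        · -- r even; run extends, A sets contador 1
          have hreven : ¬ r % 2 = 1 := fun h => hc (hpar.mp h)
          rw [ih (PySem.Int.floordiv b 10) 1 t (r + 1) hge hf'
              (fun _ => by norm_num) (by omega)
              (by rw [PySem.Int.mod_eq_emod_of_pos (by omega)]; omega)]
          simp only [if_neg hc]
          rw [PySem.Int.floordiv_eq_ediv_of_pos (show (0:Int) < 2 by omega),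
              PySem.Int.floordiv_eq_ediv_of_pos (show (0:Int) < 2 by omega)]
          omega
      · -- run ends: both sides reset
        simp only [if_neg hd]
        rw [ih (PySem.Int.floordiv b 10) 0 (t + PySem.Int.floordiv r 2) 0 hge hf'
            (fun _ => by norm_num) (by omega)
            (by rw [PySem.Int.mod_eq_emod_of_pos (by omega)]; omega)]
        have h2 : PySem.Int.floordiv (0:Int) 2 = 0 := by
          rw [PySem.Int.floordiv_eq_ediv_of_pos (by omega)]; rfl
        rw [h2]
        split_ifs <;> omega

-- ===== VERDICT (by name: the statement is the Claim_ definition above) =====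
theorem secuencia_dos_unos_spec : Claim_equal_secuencia_dos_unos := by
  intro binario contador _ hpre
  unfold Spec_secuencia_dos_unos secuencia_dos_unos secuencia_dos_unos_alt
  by_cases h0 : binario = 0
  · subst h0
    simp [secuenciaGoA]
  · rw [if_neg h0,
      secuencia_key (binario.toNat + 1) binario contador 0
        (if contador = 1 then 1 else 0) hpre (by omega) (fun h => absurd h h0)
        (by split_ifs <;> omega)
        (by rw [PySem.Int.mod_eq_emod_of_pos (by omega)]; split_ifs with h <;> simp [h])]
    rw [PySem.Int.floordiv_eq_ediv_of_pos (show (0:Int) < 2 by omega)]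
    split_ifs <;> omega
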